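-- pv_equiv track=rewrite | github.com/ulicious/hermes | data_processing/helpers_continent_connections.py | _build_reachability
-- ===== SOURCE A (Python) =====
-- def _build_reachability(connections):
--     reachability = {}
--
--     for start_continent in connections:
--         visited = set()
--         stack = [start_continent]
--
--         while stack:
--             continent = stack.pop()
--             if continent in visited:
--                 continue
--
--             visited.add(continent)
--             stack.extend(connections.get(continent, set()) - visited)
--
--         reachability[start_continent] = sorted(visited)
--
--     return reachability
-- ===== SOURCE B (Python) =====
-- def _build_reachability(connections):
--     def _reach(start):
--         visited = {start}
--         frontier = {start}
--         while frontier: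
--             next_frontier = set()
--             for node in frontier:
--                 next_frontier |= connections.get(node, set())
--             frontier = next_frontier - visited
--             visited |= frontier
--         return visited
--
--     return {start: sorted(_reach(start)) for start in connections}
-- ===== Notes on version B (the rewrite author's own statement) =====
-- stated objective: alternative
-- what changed: Replaces the per-start explicit pop/push stack DFS (with a visited check at every pop) by a level-synchronous frontier BFS: each round unions all neighbours of the current frontier, subtracts visited, and adds the new frontier wholesale; the result dict is built by a comprehension.
import Mathlib
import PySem

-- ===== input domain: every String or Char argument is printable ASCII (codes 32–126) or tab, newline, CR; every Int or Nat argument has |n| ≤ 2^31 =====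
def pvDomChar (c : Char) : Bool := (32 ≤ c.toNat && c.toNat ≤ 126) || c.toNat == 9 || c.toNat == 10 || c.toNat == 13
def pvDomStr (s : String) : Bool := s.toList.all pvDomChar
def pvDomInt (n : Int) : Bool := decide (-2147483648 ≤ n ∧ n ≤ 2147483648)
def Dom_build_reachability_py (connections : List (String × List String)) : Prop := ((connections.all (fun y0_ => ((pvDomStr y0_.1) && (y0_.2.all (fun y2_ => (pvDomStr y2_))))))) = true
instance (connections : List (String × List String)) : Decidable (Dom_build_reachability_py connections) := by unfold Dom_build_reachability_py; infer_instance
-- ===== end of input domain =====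

-- B replaces A's per-start explicit pop/push stack DFS by a level-synchronous frontier BFS
-- (alternative decomposition, same exact return value); proved equal for every input.

-- ===== PORT A =====
-- shared vocabulary: every node a traversal can touch (keys and neighbour-list entries);
-- pvNodes/pvMem_getD_nodes are cited only by the termination measures of the two loops
def pvNodes (conn : PySem.Dict String (List String)) : List String :=
  conn.keys ++ conn.values.flatten

theorem pvMem_getD_nodes (conn : PySem.Dict String (List String)) (k x : String)
    (hx : x ∈ conn.getD k []) : x ∈ pvNodes conn := by
  rw [PySem.Dict.getD_eq_get?_getD] at hx
  cases h : conn.get? k with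
  | none => rw [h] at hx; simp at hx
  | some v =>
    rw [h] at hx
    have := PySem.Dict.mem_items_of_get?_eq_some (d := conn) h
    simp only [pvNodes, List.mem_append, List.mem_flatten]
    exact Or.inr ⟨v, by
      simp only [PySem.Dict.values, List.mem_map]
      exact ⟨(k, v), this, rfl⟩, hx⟩


-- A's per-start loop: the stack is kept top-at-head (python pops and extends at the END,
-- so this list is the python stack reversed: pop = head, extend = reversed-append)
def pvStackLoop (conn : PySem.Dict String (List String))
    (visited : PySem.Set String) (stack : List String) : PySem.Set String :=
  match stack with
  | [] => visited
  | continent :: rest =>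
    if continent ∈ visited then
      pvStackLoop conn visited rest
    else
      let visited' := PySem.Set.add visited continent
      pvStackLoop conn visited'
        ((PySem.Set.diff (PySem.Set.ofList (conn.getD continent [])) visited').reverse ++ rest)
termination_by (((pvNodes conn ++ stack).toFinset \ visited.toFinset).card, stack.length)
decreasing_by
  · apply Prod.Lex.right'
    · apply Finset.card_le_card
      intro x hx
      simp only [Finset.mem_sdiff, List.mem_toFinset, List.mem_append] at hx ⊢
      exact ⟨hx.1.imp id (fun h => List.mem_cons_of_mem _ h), hx.2⟩
    · simp
  · apply Prod.Lex.left
    apply Finset.card_lt_card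
    constructor
    · intro x hx
      simp only [Finset.mem_sdiff, List.mem_toFinset, List.mem_append, List.mem_reverse] at hx ⊢
      obtain ⟨h1, h2⟩ := hx
      have hnv : x ∉ visited := fun hv => h2 (by simp [PySem.Set.mem_add, hv])
      refine ⟨?_, hnv⟩
      rcases h1 with h | h | h
      · exact Or.inl h
      · have : x ∈ conn.getD continent [] := by
          have := ((PySem.Set.mem_diff _ _ _).1 h).1
          exact (PySem.Set.mem_ofList _ _).1 this
        exact Or.inl (pvMem_getD_nodes conn continent x this)
      · exact Or.inr (List.mem_cons_of_mem _ h)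
    · intro hsub
      have hc : continent ∈ ((pvNodes conn ++ continent :: rest).toFinset \ visited.toFinset) := by
        simp_all
      have := hsub hc
      simp [PySem.Set.mem_add] at this

def build_reachability_py (connections : List (String × List String)) : List (String × List String) :=
  let conn := PySem.Dict.ofList connections
  (conn.keys.foldl
    (fun reachability start_continent =>
      reachability.insert start_continent
        (PySem.List.sorted (pvStackLoop conn PySem.Set.empty [start_continent]) (fun x => x) false))
    PySem.Dict.empty).items

-- ===== PORT B =====
-- next_frontier accumulation: the union of the neighbour sets of the frontier
def pvNext (conn : PySem.Dict String (List String)) (frontier : PySem.Set String) : PySem.Set String :=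
  frontier.foldl (fun acc node => PySem.Set.union acc (PySem.Set.ofList (conn.getD node []))) PySem.Set.empty

theorem pvMem_next (conn : PySem.Dict String (List String)) (frontier : PySem.Set String) (y : String) :
    y ∈ pvNext conn frontier ↔ ∃ n ∈ frontier, y ∈ conn.getD n [] := by
  unfold pvNext
  suffices h : ∀ (l : List String) (init : PySem.Set String),
      y ∈ l.foldl (fun acc node => PySem.Set.union acc (PySem.Set.ofList (conn.getD node []))) init ↔
        y ∈ init ∨ ∃ n ∈ l, y ∈ conn.getD n [] by
    rw [h]; simp [PySem.Set.empty]
  intro l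
  induction l with
  | nil => simp
  | cons a l ih =>
    intro init
    simp only [List.foldl_cons, ih, PySem.Set.mem_union, PySem.Set.mem_ofList, List.mem_cons]
    constructor
    · rintro ((h | h) | ⟨n, hn, hy⟩)
      · exact Or.inl h
      · exact Or.inr ⟨a, Or.inl rfl, h⟩
      · exact Or.inr ⟨n, Or.inr hn, hy⟩
    · rintro (h | ⟨n, (rfl | hn), hy⟩)
      · exact Or.inl (Or.inl h)
      · exact Or.inl (Or.inr hy)
      · exact Or.inr ⟨n, hn, hy⟩


def pvBfsLoop (conn : PySem.Dict String (List String))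
    (visited : PySem.Set String) (frontier : PySem.Set String) : PySem.Set String :=
  match frontier with
  | [] => visited
  | _ :: _ =>
    let frontier' := PySem.Set.diff (pvNext conn frontier) visited
    let visited' := PySem.Set.union visited frontier'
    pvBfsLoop conn visited' frontier'
termination_by ((((pvNodes conn).toFinset \ visited.toFinset).card, frontier.length))
decreasing_by
  rename_i head tail
  by_cases hne : (PySem.Set.diff (pvNext conn frontier) visited) = []
  · apply Prod.Lex.right'
    · apply Finset.card_le_card
      intro x hx
      simp only [Finset.mem_sdiff, List.mem_toFinset] at hx ⊢
      refine ⟨hx.1, fun hv => hx.2 ?_⟩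
      exact (PySem.Set.mem_union _ _ _).2 (Or.inl hv)
    · simp [hne]
  · apply Prod.Lex.left
    apply Finset.card_lt_card
    obtain ⟨w, hw⟩ := List.exists_mem_of_ne_nil _ hne
    have hw' := (PySem.Set.mem_diff _ _ _).1 hw
    have hwn : w ∈ pvNodes conn := by
      obtain ⟨n, _, hyn⟩ := (pvMem_next conn frontier w).1 hw'.1
      exact pvMem_getD_nodes conn n w hyn
    constructor
    · intro x hx
      simp only [Finset.mem_sdiff, List.mem_toFinset] at hx ⊢
      refine ⟨hx.1, fun hv => hx.2 ?_⟩
      exact (PySem.Set.mem_union _ _ _).2 (Or.inl hv)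
    · intro hsub
      have hmem : w ∈ ((pvNodes conn).toFinset \ visited.toFinset) := by
        simp only [Finset.mem_sdiff, List.mem_toFinset]
        exact ⟨hwn, hw'.2⟩
      have := hsub hmem
      simp only [Finset.mem_sdiff, List.mem_toFinset] at this
      exact this.2 ((PySem.Set.mem_union _ _ _).2 (Or.inr hw))

def build_reachability_py_alt (connections : List (String × List String)) : List (String × List String) :=
  let conn := PySem.Dict.ofList connections
  conn.keys.map (fun start =>
    (start, PySem.List.sorted (pvBfsLoop conn [start] [start]) (fun x => x) false))

-- ===== PRECONDITION & SPEC =====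
def Spec_build_reachability_py (connections : List (String × List String)) (out : List (String × List String)) : Prop := out = build_reachability_py_alt connections
instance (connections : List (String × List String)) (out : List (String × List String)) : Decidable (Spec_build_reachability_py connections out) := by unfold Spec_build_reachability_py; infer_instance

-- ===== CLAIM (what is proved, stated in full; the proofs are below) =====
def Claim_equal_build_reachability_py : Prop := ∀ (connections : List (String × List String)), Dom_build_reachability_py connections → Spec_build_reachability_py connections (build_reachability_py connections)

-- ===== LEMMAS AND PROOFS =====
-- both loops compute exactly the nodes reachable from the start in the graph 'conn'
-- (sound + contains-start + closed-under-neighbours), hence their sorted outputs coincide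
def pvReach (conn : PySem.Dict String (List String)) (a b : String) : Prop :=
  Relation.ReflTransGen (fun x y => y ∈ conn.getD x []) a b

theorem pvStack_sub (conn : PySem.Dict String (List String)) (visited : PySem.Set String)
    (stack : List String) :
    ∀ x, x ∈ visited ∨ x ∈ stack → x ∈ pvStackLoop conn visited stack := by
  fun_induction pvStackLoop conn visited stack with
  | case1 => simp_all
  | case2 visited continent rest hmem ih =>
    intro x hx
    apply ih
    rcases hx with h | h
    · exact Or.inl h
    · rcases List.mem_cons.1 h with rfl | h
      · exact Or.inl hmem
      · exact Or.inr h
  | case3 visited continent rest hmem visited' ih =>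
    intro x hx
    apply ih
    rcases hx with h | h
    · exact Or.inl (by simp [visited', PySem.Set.mem_add, h])
    · rcases List.mem_cons.1 h with rfl | h
      · exact Or.inl (by simp [visited', PySem.Set.mem_add])
      · exact Or.inr (by simp [h])

theorem pvStack_nodup (conn : PySem.Dict String (List String)) (visited : PySem.Set String)
    (stack : List String) (hv : visited.Nodup) : (pvStackLoop conn visited stack).Nodup := by
  fun_induction pvStackLoop conn visited stack with
  | case1 => simpa
  | case2 visited continent rest hmem ih => exact ih hv
  | case3 visited continent rest hmem visited' ih => exact ih (PySem.Set.nodup_add visited continent hv)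

theorem pvStack_sound (conn : PySem.Dict String (List String)) (s : String)
    (visited : PySem.Set String) (stack : List String)
    (hv : ∀ x ∈ visited, pvReach conn s x) (hs : ∀ x ∈ stack, pvReach conn s x) :
    ∀ x ∈ pvStackLoop conn visited stack, pvReach conn s x := by
  fun_induction pvStackLoop conn visited stack with
  | case1 => exact fun x hx => hv x hx
  | case2 visited continent rest hmem ih =>
    exact ih hv (fun x hx => hs x (List.mem_cons_of_mem _ hx))
  | case3 visited continent rest hmem visited' ih =>
    have hc : pvReach conn s continent := hs continent (List.mem_cons_self)
    apply ih
    · intro x hx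
      rcases (PySem.Set.mem_add _ _ _).1 hx with h | rfl
      · exact hv x h
      · exact hc
    · intro x hx
      rcases List.mem_append.1 hx with h | h
      · have hx' : x ∈ conn.getD continent [] := by
          have := (PySem.Set.mem_diff _ _ _).1 (List.mem_reverse.1 h)
          exact (PySem.Set.mem_ofList _ _).1 this.1
        exact Relation.ReflTransGen.tail hc hx'
      · exact hs x (List.mem_cons_of_mem _ h)

theorem pvStack_closed (conn : PySem.Dict String (List String))
    (visited : PySem.Set String) (stack : List String)
    (hinv : ∀ v ∈ visited, ∀ y ∈ conn.getD v [], y ∈ visited ∨ y ∈ stack) :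
    ∀ v ∈ pvStackLoop conn visited stack, ∀ y ∈ conn.getD v [],
      y ∈ pvStackLoop conn visited stack := by
  fun_induction pvStackLoop conn visited stack with
  | case1 => exact fun v hv y hy => ((hinv v hv y hy).resolve_right (by simp))
  | case2 visited continent rest hmem ih =>
    apply ih
    intro v hv y hy
    rcases hinv v hv y hy with h | h
    · exact Or.inl h
    · rcases List.mem_cons.1 h with rfl | h
      · exact Or.inl hmem
      · exact Or.inr h
  | case3 visited continent rest hmem visited' ih =>
    apply ih
    intro v hv y hy
    rcases (PySem.Set.mem_add _ _ _).1 hv with h | rfl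
    · rcases hinv v h y hy with h' | h'
      · exact Or.inl (by simp [visited', PySem.Set.mem_add, h'])
      · rcases List.mem_cons.1 h' with rfl | h'
        · exact Or.inl (by simp [visited', PySem.Set.mem_add])
        · exact Or.inr (by simp [h'])
    · by_cases hy' : y ∈ visited'
      · exact Or.inl hy'
      · refine Or.inr (List.mem_append.2 (Or.inl ?_))
        rw [List.mem_reverse]
        exact (PySem.Set.mem_diff _ _ _).2 ⟨(PySem.Set.mem_ofList _ _).2 hy, hy'⟩

theorem pvStack_char (conn : PySem.Dict String (List String)) (s : String) (x : String) :
    x ∈ pvStackLoop conn PySem.Set.empty [s] ↔ pvReach conn s x := by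
  constructor
  · exact fun hx =>
      pvStack_sound conn s _ _ (by simp [PySem.Set.empty])
        (by intro x hx; rcases List.mem_singleton.1 hx with rfl; exact Relation.ReflTransGen.refl) x hx
  · intro hr
    induction hr with
    | refl => exact pvStack_sub conn _ _ s (Or.inr (List.mem_singleton.2 rfl))
    | tail hab hbc ih =>
      exact pvStack_closed conn PySem.Set.empty [s] (by simp [PySem.Set.empty]) _ ih _ hbc

theorem pvBfs_sub (conn : PySem.Dict String (List String)) (visited frontier : PySem.Set String) :
    ∀ x ∈ visited, x ∈ pvBfsLoop conn visited frontier := by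
  fun_induction pvBfsLoop conn visited frontier with
  | case1 => exact fun x hx => hx
  | case2 visited head tail frontier' visited' ih =>
    exact fun x hx => ih x ((PySem.Set.mem_union _ _ _).2 (Or.inl hx))

theorem pvBfs_nodup (conn : PySem.Dict String (List String)) (visited frontier : PySem.Set String)
    (hv : visited.Nodup) : (pvBfsLoop conn visited frontier).Nodup := by
  fun_induction pvBfsLoop conn visited frontier with
  | case1 => exact hv
  | case2 visited head tail frontier' visited' ih =>
    exact ih (PySem.Set.nodup_union _ _ hv)

theorem pvBfs_sound (conn : PySem.Dict String (List String)) (s : String)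
    (visited frontier : PySem.Set String)
    (hv : ∀ x ∈ visited, pvReach conn s x) (hf : ∀ x ∈ frontier, pvReach conn s x) :
    ∀ x ∈ pvBfsLoop conn visited frontier, pvReach conn s x := by
  fun_induction pvBfsLoop conn visited frontier with
  | case1 => exact hv
  | case2 visited head tail frontier' visited' ih =>
    have hf' : ∀ x ∈ frontier', pvReach conn s x := by
      intro x hx
      have h1 := ((PySem.Set.mem_diff _ _ _).1 hx).1
      obtain ⟨n, hn, hxn⟩ := (pvMem_next conn (head :: tail) x).1 h1
      exact Relation.ReflTransGen.tail (hf n hn) hxn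
    apply ih
    · intro x hx
      rcases (PySem.Set.mem_union _ _ _).1 hx with h | h
      · exact hv x h
      · exact hf' x h
    · exact hf'

theorem pvBfs_closed (conn : PySem.Dict String (List String))
    (visited frontier : PySem.Set String)
    (hfv : ∀ x ∈ frontier, x ∈ visited)
    (hinv : ∀ v ∈ visited, v ∈ frontier ∨ ∀ y ∈ conn.getD v [], y ∈ visited) :
    ∀ v ∈ pvBfsLoop conn visited frontier, ∀ y ∈ conn.getD v [],
      y ∈ pvBfsLoop conn visited frontier := by
  fun_induction pvBfsLoop conn visited frontier with
  | case1 visited =>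
    exact fun v hv y hy => ((hinv v hv).resolve_left (by simp)) y hy
  | case2 visited head tail frontier' visited' ih =>
    apply ih
    · exact fun x hx => (PySem.Set.mem_union _ _ _).2 (Or.inr hx)
    · intro v hv
      rcases (PySem.Set.mem_union _ _ _).1 hv with h | h
      · rcases hinv v h with h' | h'
        · refine Or.inr (fun y hy => ?_)
          by_cases hyv : y ∈ visited
          · exact (PySem.Set.mem_union _ _ _).2 (Or.inl hyv)
          · refine (PySem.Set.mem_union _ _ _).2 (Or.inr ?_)
            refine (PySem.Set.mem_diff _ _ _).2 ⟨?_, hyv⟩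
            exact (pvMem_next conn (head :: tail) y).2 ⟨v, h', hy⟩
        · exact Or.inr (fun y hy => (PySem.Set.mem_union _ _ _).2 (Or.inl (h' y hy)))
      · exact Or.inl h

theorem pvBfs_char (conn : PySem.Dict String (List String)) (s : String) (x : String) :
    x ∈ pvBfsLoop conn [s] [s] ↔ pvReach conn s x := by
  constructor
  · exact fun hx => pvBfs_sound conn s [s] [s]
      (by intro x hx; rcases List.mem_singleton.1 hx with rfl; exact Relation.ReflTransGen.refl)
      (by intro x hx; rcases List.mem_singleton.1 hx with rfl; exact Relation.ReflTransGen.refl) x hx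
  · intro hr
    induction hr with
    | refl => exact pvBfs_sub conn [s] [s] s (List.mem_singleton.2 rfl)
    | tail hab hbc ih =>
      exact pvBfs_closed conn [s] [s] (fun x hx => hx)
        (fun v hv => Or.inl hv) _ ih _ hbc

theorem pvSorted_eq (conn : PySem.Dict String (List String)) (s : String) :
    PySem.List.sorted (pvStackLoop conn PySem.Set.empty [s]) (fun x => x) false =
    PySem.List.sorted (pvBfsLoop conn [s] [s]) (fun x => x) false := by
  set vA := pvStackLoop conn PySem.Set.empty [s] with hA
  set vB := pvBfsLoop conn [s] [s] with hB
  have hnA : vA.Nodup := pvStack_nodup conn _ _ (by simp [PySem.Set.empty])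
  have hnB : vB.Nodup := pvBfs_nodup conn _ _ (by simp)
  have hmem : ∀ x, x ∈ vA ↔ x ∈ vB := fun x =>
    (pvStack_char conn s x).trans (pvBfs_char conn s x).symm
  have hperm : vB.Perm vA := (List.perm_ext_iff_of_nodup hnB hnA).2 (fun x => (hmem x).symm)
  set t := PySem.List.sorted vB (fun x => x) false with ht
  have htp : t.Perm vB := PySem.List.sorted_perm _ _ _
  have htn : t.Nodup := htp.nodup_iff.2 hnB
  have hle : t.Pairwise (fun a b => a ≤ b) := PySem.List.sorted_pairwise _ _
  have hlt : t.Pairwise (fun a b => a < b) := by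
    have := List.Pairwise.and hle htn
    exact this.imp (fun h => lt_of_le_of_ne h.1 h.2)
  exact PySem.List.sorted_eq_of_perm_of_pairwise_lt vA t (fun x => x) (htp.trans hperm) hlt

theorem pv_eq (connections : List (String × List String)) :
    build_reachability_py connections = build_reachability_py_alt connections := by
  unfold build_reachability_py build_reachability_py_alt
  dsimp only
  rw [PySem.Dict.items_foldl_insert_fresh (PySem.Dict.ofList connections).keys (fun s => s) _ _
    (fun a _ => PySem.Dict.contains_empty a)
    (by simp)]
  simp only [PySem.Dict.empty, List.nil_append]
  exact List.map_congr_left (fun s _ => by rw [pvSorted_eq])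

-- ===== VERDICT (by name: the statement is the Claim_ definition above) =====
theorem build_reachability_py_spec : Claim_equal_build_reachability_py := by
  intro connections _
  unfold Spec_build_reachability_py
  exact pv_eq connections
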